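-- pv_equiv track=rewrite | github.com/Windows81/Reverse-Words | data.py | expand_vowels
-- ===== SOURCE A (Python) =====
-- def expand_vowels(t: list[str]) -> list[list[str]]:
--     r = [[]]
--     for s in t:
--         if s[0] in ['A', 'E', 'I', 'O', 'U']:
--             v = ['0', '1', '2']
--         else:
--             v = ['']
--         r = [
--             [*rem, f'{s}{suf}']
--             for rem in r
--             for suf in v
--         ]
--     return r
-- ===== SOURCE B (Python) =====
-- def expand_vowels(t: list[str]) -> list[list[str]]:
--     # Mixed-radix enumeration: row k of the result is obtained by decoding the
--     # index k in the mixed radix given by the number of variants of each word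
--     # (3 for vowel-initial words, 1 otherwise), most significant digit first.
--     radix = [3 if s[0] in ['A', 'E', 'I', 'O', 'U'] else 1 for s in t]
--     total = 1
--     for b in radix:
--         total *= b
--     out = []
--     for k in range(total):
--         weight = total
--         rem = k
--         row = []
--         for s, b in zip(t, radix):
--             weight //= b
--             d = rem // weight
--             rem -= d * weight
--             row.append(s + (str(d) if b == 3 else ''))
--         out.append(row)
--     return out
-- ===== Notes on version B (the rewrite author's own statement) =====
-- stated objective: faster
-- what changed: Replaces A's incremental accumulator fold (which re-copies every partial row at each of the n steps, O(n) passes over growing rows) with mixed-radix index decoding: the row count is computed up front and row k is produced directly by decoding the index k, so each output row is built exactly once.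
import Mathlib
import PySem

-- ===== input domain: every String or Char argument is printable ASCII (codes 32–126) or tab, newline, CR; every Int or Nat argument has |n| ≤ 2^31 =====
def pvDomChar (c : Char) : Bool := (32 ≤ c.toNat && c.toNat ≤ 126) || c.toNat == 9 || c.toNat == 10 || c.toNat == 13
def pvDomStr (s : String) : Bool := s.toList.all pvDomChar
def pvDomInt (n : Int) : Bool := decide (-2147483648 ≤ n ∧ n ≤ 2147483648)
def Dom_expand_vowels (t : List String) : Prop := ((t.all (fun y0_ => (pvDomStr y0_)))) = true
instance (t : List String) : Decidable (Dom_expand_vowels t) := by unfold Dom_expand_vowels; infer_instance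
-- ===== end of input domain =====

-- B replaces A's incremental accumulator fold by mixed-radix index decoding: the row
-- count is computed up front and row k is decoded directly from the index k (alternative algorithm).


-- ===== PORT A =====
def expand_vowels (t : List String) : List (List String) :=
  t.foldl (fun r s =>
    let v : List String :=
      if PySem.Str.pyGet? s 0 ∈ [some 'A', some 'E', some 'I', some 'O', some 'U']
      then ["0", "1", "2"] else [""]
    r.flatMap (fun rem => v.map (fun suf => rem ++ [s ++ suf]))) [[]]

-- ===== PORT B =====
def expand_vowels_alt (t : List String) : List (List String) :=
  let radix : List Nat := t.map (fun s =>
    if PySem.Str.pyGet? s 0 ∈ [some 'A', some 'E', some 'I', some 'O', some 'U'] then 3 else 1)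
  let total : Nat := radix.foldl (· * ·) 1
  (List.range total).map (fun k =>
    ((t.zip radix).foldl (fun (st : Nat × Nat × List String) p =>
        let weight := st.1 / p.2
        let d := st.2.1 / weight
        (weight, st.2.1 - d * weight,
         st.2.2 ++ [p.1 ++ (if p.2 == 3 then PySem.Int.toStr (Int.ofNat d) else "")]))
      (total, k, ([] : List String))).2.2)

-- ===== PRECONDITION & SPEC =====
-- Pre_ excludes lists containing the empty string, on which Python A raises IndexError at s[0] (B raises too).
def Pre_expand_vowels (t : List String) : Prop := ∀ s ∈ t, s ≠ ""
instance (t : List String) : Decidable (Pre_expand_vowels t) := by unfold Pre_expand_vowels; infer_instance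
def pvWitness_expand_vowels : List String := (["Apple", "dog"])
def Spec_expand_vowels (t : List String) (out : List (List String)) : Prop := out = expand_vowels_alt t
instance (t : List String) (out : List (List String)) : Decidable (Spec_expand_vowels t out) := by unfold Spec_expand_vowels; infer_instance

-- ===== CLAIM (what is proved, stated in full; the proofs are below) =====
def Claim_equal_expand_vowels : Prop := ∀ (t : List String), Dom_expand_vowels t → Pre_expand_vowels t → Spec_expand_vowels t (expand_vowels t)

-- ===== LEMMAS AND PROOFS =====

-- the per-word variant count (B's radix entry)
def pvRad (s : String) : Nat :=
  if PySem.Str.pyGet? s 0 ∈ [some 'A', some 'E', some 'I', some 'O', some 'U'] then 3 else 1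

-- total number of rows
def pvTot (t : List String) : Nat := (t.map pvRad).foldl (· * ·) 1

-- reference Cartesian product (back-to-front), the common value of both programs
def pvChoice (s : String) : List String :=
  if PySem.Str.pyGet? s 0 ∈ [some 'A', some 'E', some 'I', some 'O', some 'U']
  then [s ++ "0", s ++ "1", s ++ "2"] else [s]

def pvProd (t : List String) : List (List String) :=
  t.foldr (fun s out => (pvChoice s).flatMap (fun x => out.map (fun rest => x :: rest))) [[]]

-- mixed-radix decoding of index k into a row
def pvDecode : List String → Nat → List String
  | [], _ => []
  | s :: t, k => (s ++ (if pvRad s == 3 then PySem.Int.toStr (Int.ofNat (k / pvTot t)) else ""))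
      :: pvDecode t (k % pvTot t)

lemma foldl_mul_shift (l : List Nat) (a : Nat) :
    l.foldl (· * ·) a = a * l.foldl (· * ·) 1 := by
  induction l generalizing a with
  | nil => simp
  | cons x l ih => simp only [List.foldl_cons]; rw [ih (a * x), ih (1 * x)]; ring

lemma pvTot_cons (s : String) (t : List String) : pvTot (s :: t) = pvRad s * pvTot t := by
  simp only [pvTot, List.map_cons, List.foldl_cons]
  rw [foldl_mul_shift _ (1 * pvRad s)]; ring

lemma pvRad_pos (s : String) : 0 < pvRad s := by
  unfold pvRad; split_ifs <;> norm_num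

lemma pvTot_pos (t : List String) : 0 < pvTot t := by
  induction t with
  | nil => simp [pvTot]
  | cons s t ih => rw [pvTot_cons]; exact Nat.mul_pos (pvRad_pos s) ih

-- B's inner zip-fold, started with the correct weight, appends the decoded row
lemma fold_decode (t : List String) (k : Nat) (row0 : List String) :
    ((t.zip (t.map pvRad)).foldl (fun (st : Nat × Nat × List String) p =>
        let weight := st.1 / p.2
        let d := st.2.1 / weight
        (weight, st.2.1 - d * weight,
         st.2.2 ++ [p.1 ++ (if p.2 == 3 then PySem.Int.toStr (Int.ofNat d) else "")]))
      (pvTot t, k, row0)).2.2 = row0 ++ pvDecode t k := by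
  induction t generalizing k row0 with
  | nil => simp [pvDecode]
  | cons s t ih =>
    simp only [List.map_cons, List.zip_cons_cons, List.foldl_cons]
    have hw : pvTot (s :: t) / pvRad s = pvTot t := by
      rw [pvTot_cons]; exact Nat.mul_div_cancel_left _ (pvRad_pos s)
    have hrem : k - k / pvTot t * pvTot t = k % pvTot t := by
      have := Nat.div_add_mod k (pvTot t)
      rw [Nat.mul_comm]; omega
    simp only [hw, hrem]
    rw [ih]
    simp [pvDecode]

-- decoding a composite index d * pvTot t + r splits into head digit and tail decoding
lemma pvDecode_cons (s : String) (t : List String) (d r : Nat) (hr : r < pvTot t) :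
    pvDecode (s :: t) (d * pvTot t + r)
      = (s ++ (if pvRad s == 3 then PySem.Int.toStr (Int.ofNat d) else "")) :: pvDecode t r := by
  have hd : (d * pvTot t + r) / pvTot t = d := by
    rw [Nat.add_comm, Nat.mul_comm, Nat.add_mul_div_left _ _ (pvTot_pos t), Nat.div_eq_of_lt hr]
    omega
  have hm : (d * pvTot t + r) % pvTot t = r := by
    rw [Nat.add_comm, Nat.mul_comm, Nat.add_mul_mod_self_left, Nat.mod_eq_of_lt hr]
  simp [pvDecode, hd, hm]

lemma range_mul_flatMap (b T : Nat) :
    List.range (b * T) = (List.range b).flatMap (fun d => (List.range T).map (fun r => d * T + r)) := by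
  induction b with
  | zero => simp
  | succ b ih =>
    rw [Nat.succ_mul, List.range_add, ih, List.range_succ]
    simp

-- B's enumeration equals the reference product
lemma decode_range_eq (t : List String) :
    (List.range (pvTot t)).map (pvDecode t) = pvProd t := by
  induction t with
  | nil => simp [pvTot, pvDecode, pvProd]
  | cons s t ih =>
    have t0 : PySem.Int.toStr (0 : Int) = "0" := by decide
    have t1 : PySem.Int.toStr (1 : Int) = "1" := by decide
    have t2 : PySem.Int.toStr (2 : Int) = "2" := by decide
    have hchoice : (List.range (pvRad s)).map
        (fun d => s ++ (if pvRad s == 3 then PySem.Int.toStr (Int.ofNat d) else "")) = pvChoice s := by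
      by_cases h : PySem.Str.pyGet? s 0 ∈ [some 'A', some 'E', some 'I', some 'O', some 'U']
      · have h3 : pvRad s = 3 := by unfold pvRad; rw [if_pos h]
        have hc : pvChoice s = [s ++ "0", s ++ "1", s ++ "2"] := by unfold pvChoice; rw [if_pos h]
        simp [h3, hc, List.range_succ, t0, t1, t2]
      · have h1 : pvRad s = 1 := by unfold pvRad; rw [if_neg h]
        have hc : pvChoice s = [s] := by unfold pvChoice; rw [if_neg h]
        simp [h1, hc, List.range_succ]
    have hR : pvProd (s :: t) = (pvChoice s).flatMap (fun x => (pvProd t).map (x :: ·)) := by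
      simp [pvProd]
    rw [pvTot_cons, range_mul_flatMap, List.map_flatMap, hR, ← hchoice, List.flatMap_map]
    apply List.flatMap_congr
    intro d _
    rw [← ih, List.map_map, List.map_map]
    apply List.map_congr_left
    intro r hrng
    simp only [Function.comp]
    exact pvDecode_cons s t d r (List.mem_range.mp hrng)

-- A's fold from any accumulator = every accumulator row extended by every product row
lemma ev_foldl (t : List String) (acc : List (List String)) :
    t.foldl (fun r s =>
      let v : List String :=
        if PySem.Str.pyGet? s 0 ∈ [some 'A', some 'E', some 'I', some 'O', some 'U']
        then ["0", "1", "2"] else [""]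
      r.flatMap (fun rem => v.map (fun suf => rem ++ [s ++ suf]))) acc
      = acc.flatMap (fun rem => (pvProd t).map (fun row => rem ++ row)) := by
  induction t generalizing acc with
  | nil => simp [pvProd]
  | cons s t ih =>
    simp only [List.foldl_cons]
    rw [ih]
    have hc : (if PySem.Str.pyGet? s 0 ∈ [some 'A', some 'E', some 'I', some 'O', some 'U']
        then (["0", "1", "2"] : List String) else [""]).map (fun suf => s ++ suf) = pvChoice s := by
      unfold pvChoice; split_ifs <;> simp
    simp only [pvProd, List.foldr_cons, ← hc, List.flatMap_assoc, List.flatMap_map]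
    apply List.flatMap_congr
    intro rem _
    rw [List.map_flatMap]
    apply List.flatMap_congr
    intro suf _
    simp

-- ===== VERDICT (by name: the statement is the Claim_ definition above) =====
theorem expand_vowels_spec : Claim_equal_expand_vowels := by
  intro t _ _
  have hA : expand_vowels t = pvProd t := by
    unfold expand_vowels; rw [ev_foldl]; simp
  have hB : expand_vowels_alt t = pvProd t := by
    rw [← decode_range_eq]
    unfold expand_vowels_alt
    exact List.map_congr_left fun k _ => fold_decode t k []
  unfold Spec_expand_vowels
  rw [hA, hB]
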